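-- pv_equiv track=rewrite | github.com/jonghocode/Algorithm | 백준 2138(전구와 스위치).py | search
-- ===== SOURCE A (Python) =====
-- def search(start, end, cnt):
--     for i in range(1, len(start)):
--         if start[i-1] != end[i-1]:
--             cnt += 1
--             for j in range(i-1, i+2):
--                 if j<len(start):
--                     if start[j] == 0:
--                         start[j] = 1
--                     else:
--                         start[j] = 0
--
--     if start == end:
--         return cnt
--     else:
--         return 987654321
-- ===== SOURCE B (Python) =====
-- def search(start, end, cnt):
--     n = len(start)
--     # Pass 1: decide which switches to press, without touching start.
--     # p2/p1 record whether the switches at iterations i-2 and i-1 were pressed;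
--     # a cell pressed once holds toggle(v), pressed twice holds toggle(toggle(v)).
--     presses = []
--     p2 = p1 = False
--     for i in range(1, n):
--         v = start[i - 1]
--         c = (1 if p2 else 0) + (1 if p1 else 0)
--         if c == 0:
--             eff = v
--         elif c == 1:
--             eff = 1 if v == 0 else 0
--         else:
--             eff = 0 if v == 0 else 1
--         press = eff != end[i - 1]
--         if press:
--             presses.append(i)
--         p2, p1 = p1, press
--     # Pass 2: apply the recorded presses, mutating start exactly as A does.
--     for m in presses:
--         for j in (m - 1, m, m + 1):
--             if j < n:
--                 start[j] = 1 if start[j] == 0 else 0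
--     cnt += len(presses)
--     return cnt if start == end else 987654321
-- ===== Notes on version B (the rewrite author's own statement) =====
-- stated objective: alternative
-- what changed: B replaces A's single mutate-as-you-go greedy loop by a decide-then-apply two-pass: pass 1 scans the untouched list, tracking with two booleans how often the last two iterations pressed positions, and records the press indices; pass 2 replays the recorded presses on the list.
import Mathlib
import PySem

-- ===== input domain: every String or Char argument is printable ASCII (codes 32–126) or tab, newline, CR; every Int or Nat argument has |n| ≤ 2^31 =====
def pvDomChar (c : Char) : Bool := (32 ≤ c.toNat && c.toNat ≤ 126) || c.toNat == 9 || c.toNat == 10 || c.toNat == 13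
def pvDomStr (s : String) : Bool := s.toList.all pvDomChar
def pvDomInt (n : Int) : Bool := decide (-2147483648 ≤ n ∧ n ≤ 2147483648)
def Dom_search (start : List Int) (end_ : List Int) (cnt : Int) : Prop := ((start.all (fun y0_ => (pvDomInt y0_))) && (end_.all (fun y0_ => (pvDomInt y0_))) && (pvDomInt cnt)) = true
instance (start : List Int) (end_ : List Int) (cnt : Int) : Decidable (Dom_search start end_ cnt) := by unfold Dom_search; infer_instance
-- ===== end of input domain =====

-- B replaces A's mutate-as-you-go greedy loop by a decide-then-apply two-pass (press indices
-- recorded in a non-mutating scan, then replayed); same cost; the Python B also performs the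
-- same in-place mutation of `start` as A, so the equivalence is not return-value-only.

-- Python's `1 if x == 0 else 0` cell toggle (any non-zero becomes 0).
def toggle (v : Int) : Int := if v = 0 then 1 else 0

-- ===== PORT A =====
-- one iteration of A's outer loop: state = (current list, cnt); len(start) is constant (assignment preserves length)
def stepA (n : Nat) (end_ : List Int) (s : List Int × Int) (i : Int) : List Int × Int :=
  if s.1.getD (i-1).toNat 0 ≠ end_.getD (i-1).toNat 0 then
    ((PySem.List.pyRange (i-1) (i+2) 1).foldl
       (fun l j => if j < (n : Int) then l.set j.toNat (toggle (l.getD j.toNat 0)) else l) s.1,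
     s.2 + 1)
  else s

def search (start : List Int) (end_ : List Int) (cnt : Int) : Int :=
  let res := (PySem.List.pyRange 1 (start.length : Int) 1).foldl (stepA start.length end_) (start, cnt)
  if res.1 = end_ then res.2 else 987654321

-- ===== PORT B =====
-- press switch m: toggle cells m-1, m, m+1 (guarded by j < n, as in Source B's second pass)
def pressTriple (n : Nat) (l : List Int) (m : Int) : List Int :=
  [m-1, m, m+1].foldl
    (fun l j => if j < (n : Int) then l.set j.toNat (toggle (l.getD j.toNat 0)) else l) l

-- one iteration of Source B's pass 1: state = (p2, p1, presses); reads only the original list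
def stepB (start end_ : List Int) (s : Bool × Bool × List Int) (i : Int) : Bool × Bool × List Int :=
  let v := start.getD (i-1).toNat 0
  let c : Nat := (if s.1 then 1 else 0) + (if s.2.1 then 1 else 0)
  let eff := if c = 0 then v else if c = 1 then toggle v else toggle (toggle v)
  let press := decide (eff ≠ end_.getD (i-1).toNat 0)
  (s.2.1, press, if press then s.2.2 ++ [i] else s.2.2)

def search_alt (start : List Int) (end_ : List Int) (cnt : Int) : Int :=
  let d := (PySem.List.pyRange 1 (start.length : Int) 1).foldl (stepB start end_) (false, false, [])
  let fin := d.2.2.foldl (pressTriple start.length) start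
  if fin = end_ then cnt + (d.2.2.length : Int) else 987654321

-- ===== PRECONDITION & SPEC =====
-- Pre_ excludes exactly the inputs where Python A raises IndexError (end shorter than the scan needs).
def Pre_search (start : List Int) (end_ : List Int) (cnt : Int) : Prop :=
  start.length ≤ end_.length + 1
instance (start : List Int) (end_ : List Int) (cnt : Int) : Decidable (Pre_search start end_ cnt) := by unfold Pre_search; infer_instance

def pvWitness_search : List Int × List Int × Int := ([0, 1, 0], [1, 0, 0], 0)

def Spec_search (start : List Int) (end_ : List Int) (cnt : Int) (out : Int) : Prop := out = search_alt start end_ cnt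
instance (start : List Int) (end_ : List Int) (cnt : Int) (out : Int) : Decidable (Spec_search start end_ cnt out) := by unfold Spec_search; infer_instance

-- ===== CLAIM (what is proved, stated in full; the proofs are below) =====
def Claim_equal_search : Prop := ∀ (start : List Int) (end_ : List Int) (cnt : Int), Dom_search start end_ cnt → Pre_search start end_ cnt → Spec_search start end_ cnt (search start end_ cnt)

-- ===== LEMMAS AND PROOFS =====

def b2n (b : Bool) : Nat := if b then 1 else 0

-- A's state after the iterations i = 1 .. k-1
def runA (start end_ : List Int) (cnt : Int) (k : Nat) : List Int × Int :=
  (PySem.List.pyRange 1 (k : Int) 1).foldl (stepA start.length end_) (start, cnt)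

-- B's pass-1 state after the iterations i = 1 .. k-1
def runB (start end_ : List Int) (k : Nat) : Bool × Bool × List Int :=
  (PySem.List.pyRange 1 (k : Int) 1).foldl (stepB start end_) (false, false, [])

theorem length_pressTriple (n : Nat) (l : List Int) (m : Int) :
    (pressTriple n l m).length = l.length := by
  simp only [pressTriple, List.foldl]
  split_ifs <;> simp

-- pointwise effect of A's/B's single guarded toggle-assignment
def setToggle (n : Nat) (l : List Int) (j : Int) : List Int :=
  if j < (n : Int) then l.set j.toNat (toggle (l.getD j.toNat 0)) else l

theorem length_setToggle (n : Nat) (l : List Int) (i : Int) :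
    (setToggle n l i).length = l.length := by
  unfold setToggle; split_ifs <;> simp

theorem getD_setToggle (n : Nat) (l : List Int) (hn : n = l.length) (i : Int) (hi : 0 ≤ i)
    (j : Nat) (hj : j < n) :
    (setToggle n l i).getD j 0 =
      if (j : Int) = i then toggle (l.getD j 0) else l.getD j 0 := by
  subst hn
  unfold setToggle
  by_cases hji : (j : Int) = i
  · have hlt : i < (l.length : Int) := by omega
    have hidx : i.toNat = j := by omega
    rw [if_pos hlt, if_pos hji, hidx]
    simp [List.getD, List.getElem?_set, hj]
  · rw [if_neg hji]
    split_ifs with hlt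
    · have hne : i.toNat ≠ j := by omega
      simp [List.getD, List.getElem?_set, hne]
    · rfl

-- pointwise effect of one press
theorem getD_pressTriple (n : Nat) (l : List Int) (hn : n = l.length) (m : Int) (hm : 1 ≤ m)
    (j : Nat) (hj : j < n) :
    (pressTriple n l m).getD j 0 =
      if (j : Int) = m - 1 ∨ (j : Int) = m ∨ (j : Int) = m + 1
      then toggle (l.getD j 0) else l.getD j 0 := by
  have hfold : pressTriple n l m =
      setToggle n (setToggle n (setToggle n l (m-1)) m) (m+1) := rfl
  have hlen1 : n = (setToggle n l (m-1)).length := by rw [length_setToggle]; exact hn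
  have hlen2 : n = (setToggle n (setToggle n l (m-1)) m).length := by
    rw [length_setToggle]; exact hlen1
  rw [hfold, getD_setToggle n _ hlen2 (m+1) (by omega) j hj,
      getD_setToggle n _ hlen1 m (by omega) j hj,
      getD_setToggle n l hn (m-1) (by omega) j hj]
  split_ifs <;> first | rfl | (exfalso; omega)


-- the cell at j after replaying a press list = toggle iterated (number of presses touching j)
theorem getD_foldl_pressTriple (n : Nat) (P : List Int) (l : List Int) (hn : n = l.length)
    (hP : ∀ m ∈ P, 1 ≤ m) (j : Nat) (hj : j < n) :
    (P.foldl (pressTriple n) l).getD j 0 =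
      toggle^[P.countP (fun m => decide ((j : Int) = m - 1 ∨ (j : Int) = m ∨ (j : Int) = m + 1))]
        (l.getD j 0) := by
  induction P generalizing l with
  | nil => simp
  | cons p P ih =>
    have hp : 1 ≤ p := hP p (by simp)
    have hstep := getD_pressTriple n l hn p hp j hj
    have hlen : n = (pressTriple n l p).length := by rw [length_pressTriple]; exact hn
    rw [List.foldl_cons, ih (pressTriple n l p) hlen (fun m hm => hP m (by simp [hm]))]
    rw [List.countP_cons]
    by_cases hc : (j : Int) = p - 1 ∨ (j : Int) = p ∨ (j : Int) = p + 1
    · rw [hstep, if_pos hc]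
      simp [hc, Function.iterate_succ_apply]
    · rw [hstep, if_neg hc]
      simp [hc]

-- the triple countP decomposed as three plain counts
theorem countP_triple_eq (P : List Int) (j : Nat) :
    P.countP (fun m => decide ((j : Int) = m - 1 ∨ (j : Int) = m ∨ (j : Int) = m + 1)) =
      P.count ((j : Int) - 1) + P.count (j : Int) + P.count ((j : Int) + 1) := by
  induction P with
  | nil => simp
  | cons p P ih =>
    simp only [List.countP_cons, List.count_cons, ih, beq_iff_eq, decide_eq_true_eq]
    split_ifs <;> omega

-- B's effective-value formula is toggle iterated (presses at i-2) + (presses at i-1) times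
theorem eff_eq_iterate (p2 p1 : Bool) (v : Int) :
    (if ((if p2 then 1 else 0) + (if p1 then 1 else 0) : Nat) = 0 then v
     else if ((if p2 then 1 else 0) + (if p1 then 1 else 0) : Nat) = 1 then toggle v
     else toggle (toggle v)) = toggle^[b2n p2 + b2n p1] v := by
  cases p2 <;> cases p1 <;> simp [b2n, Function.iterate_succ_apply]

-- A's inner triple loop is exactly one pressTriple
theorem innerA_eq_pressTriple (n : Nat) (l : List Int) (i : Int) :
    (PySem.List.pyRange (i-1) (i+2) 1).foldl
      (fun l j => if j < (n : Int) then l.set j.toNat (toggle (l.getD j.toNat 0)) else l) l =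
    pressTriple n l i := by
  have e1 : i - 1 + 1 = i := by ring
  have e2 : i + 1 + 1 = i + 2 := by ring
  rw [PySem.List.pyRange_one_cons (show i - 1 < i + 2 by omega), e1,
      PySem.List.pyRange_one_cons (show i < i + 2 by omega),
      PySem.List.pyRange_one_cons (show i + 1 < i + 2 by omega), e2,
      PySem.List.pyRange_one_eq_nil (le_refl (i + 2))]
  rfl

-- the simulation invariant: after the iterations 1..k-1, A's list is B's press replay, A's cnt
-- is cnt + #presses, presses lie in [1, k-1], and (p1, p2) are the press counts at k-1, k-2
theorem invariant (start end_ : List Int) (cnt : Int) (k : Nat) (hk : k ≤ start.length) :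
    (runA start end_ cnt k).1 =
        (runB start end_ k).2.2.foldl (pressTriple start.length) start ∧
    (runA start end_ cnt k).2 = cnt + ((runB start end_ k).2.2.length : Int) ∧
    (∀ m ∈ (runB start end_ k).2.2, 1 ≤ m ∧ m ≤ (k : Int) - 1) ∧
    (runB start end_ k).2.2.count ((k : Int) - 1) = b2n (runB start end_ k).2.1 ∧
    (runB start end_ k).2.2.count ((k : Int) - 2) = b2n (runB start end_ k).1 := by
  induction k with
  | zero =>
    simp [runA, runB, PySem.List.pyRange_one_eq_nil (by omega : (0:Int) ≤ 1), b2n]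
  | succ k ih =>
    by_cases hk1 : k = 0
    · subst hk1
      simp [runA, runB, PySem.List.pyRange_one_eq_nil (by omega : ((1:Nat) : Int) ≤ 1), b2n]
    · have hk' : k ≤ start.length := by omega
      obtain ⟨ihL, ihC, ihM, ih1, ih2⟩ := ih hk'
      have hsplit : PySem.List.pyRange 1 (((k+1 : Nat)) : Int) 1 =
          PySem.List.pyRange 1 (k : Int) 1 ++ [(k : Int)] := by
        have hc : (((k+1 : Nat)) : Int) = (k : Int) + 1 := by push_cast; ring
        rw [hc]
        exact PySem.List.pyRange_one_succ_right (by omega)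
      have hA : runA start end_ cnt (k+1) = stepA start.length end_ (runA start end_ cnt k) (k : Int) := by
        rw [runA, runA, hsplit, List.foldl_append]; rfl
      have hB : runB start end_ (k+1) = stepB start end_ (runB start end_ k) (k : Int) := by
        rw [runB, runB, hsplit, List.foldl_append]; rfl
      set SA := runA start end_ cnt k with hSA
      set SB := runB start end_ k with hSB
      have hj : k - 1 < start.length := by omega
      have hcast : ((k : Int) - 1).toNat = k - 1 := by omega
      have hcnt0 : SB.2.2.count ((k : Int)) = 0 := by
        rw [List.count_eq_zero]
        intro hmem
        have := (ihM _ hmem).2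
        omega
      -- the value A reads at position k-1 equals B's effective value
      have hread : SA.1.getD (k - 1) 0 = toggle^[b2n SB.1 + b2n SB.2.1] (start.getD (k - 1) 0) := by
        rw [ihL, getD_foldl_pressTriple start.length SB.2.2 start rfl
              (fun m hm => (ihM m hm).1) (k - 1) hj, countP_triple_eq]
        have e1 : (((k - 1 : Nat)) : Int) - 1 = (k : Int) - 2 := by omega
        have e2 : (((k - 1 : Nat)) : Int) = (k : Int) - 1 := by omega
        have e3 : ((k : Int) - 1) + 1 = (k : Int) := by omega
        rw [e1, e2, e3, ih1, ih2, hcnt0]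
        simp
      by_cases hp : toggle^[b2n SB.1 + b2n SB.2.1] (start.getD (k - 1) 0) ≠ end_.getD (k - 1) 0
      · -- a press happens at iteration k on both sides
        have hstepA : stepA start.length end_ SA (k : Int) =
            (pressTriple start.length SA.1 (k : Int), SA.2 + 1) := by
          rw [stepA, hcast, hread, if_pos hp, innerA_eq_pressTriple]
        have hstepB : stepB start end_ SB (k : Int) =
            (SB.2.1, true, SB.2.2 ++ [(k : Int)]) := by
          simp only [stepB, hcast, eff_eq_iterate]
          rw [decide_eq_true hp]
          simp
        rw [hA, hB, hstepA, hstepB]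
        refine ⟨?_, ?_, ?_, ?_, ?_⟩
        · show pressTriple start.length SA.1 (k : Int) =
            List.foldl (pressTriple start.length) start (SB.2.2 ++ [(k : Int)])
          rw [List.foldl_append, ← ihL]
          rfl
        · show SA.2 + 1 = cnt + ((SB.2.2 ++ [(k : Int)]).length : Int)
          rw [ihC]
          simp [List.length_append]
          push_cast
          ring
        · intro m hm
          rcases List.mem_append.mp hm with h | h
          · have := ihM m h
            constructor <;> [exact this.1; omega]
          · have : m = (k : Int) := by simpa using h
            subst this
            constructor <;> omega
        · have ec : (((k+1 : Nat)) : Int) - 1 = (k : Int) := by push_cast; ring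
          rw [ec]
          simp [List.count_append, hcnt0, b2n]
        · have ec : (((k+1 : Nat)) : Int) - 2 = (k : Int) - 1 := by push_cast; ring
          rw [ec]
          simp [List.count_append, List.count_cons, List.count_nil,
                show ¬((k : Int) = (k : Int) - 1) from by omega, ih1]
      · -- no press at iteration k
        have hstepA : stepA start.length end_ SA (k : Int) = SA := by
          rw [stepA, hcast, hread, if_neg hp]
        have hstepB : stepB start end_ SB (k : Int) =
            (SB.2.1, false, SB.2.2) := by
          simp only [stepB, hcast, eff_eq_iterate]
          rw [decide_eq_false hp]
          simp
        rw [hA, hB, hstepA, hstepB]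
        refine ⟨ihL, ihC, ?_, ?_, ?_⟩
        · intro m hm
          have := ihM m hm
          constructor <;> [exact this.1; omega]
        · have ec : (((k+1 : Nat)) : Int) - 1 = (k : Int) := by push_cast; ring
          rw [ec]
          simp [hcnt0, b2n]
        · have ec : (((k+1 : Nat)) : Int) - 2 = (k : Int) - 1 := by push_cast; ring
          rw [ec, ih1]

-- ===== VERDICT (by name: the statement is the Claim_ definition above) =====
theorem search_spec : Claim_equal_search := by
  intro start end_ cnt _ _
  obtain ⟨hL, hC, _, _, _⟩ := invariant start end_ cnt start.length (le_refl _)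
  simp only [runA, runB] at hL hC
  simp only [Spec_search, search, search_alt]
  rw [hL, hC]
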